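-- pv_equiv track=rewrite | github.com/danswk/misc | uni py/pr19ds.py | ismyrulercomplete
-- ===== SOURCE A (Python) =====
-- from itertools import combinations
--
-- def ismyrulercomplete(myruler):
--     diffs=[abs(a-b) for a,b in combinations(myruler,2)]
--     k=1
--     while k<=max(myruler):
--         isincl=diffs.count(k)
--         if isincl==0:
--             return False
--         k+=1
--     return True
-- ===== SOURCE B (Python) =====
-- def ismyrulercomplete(myruler):
--     marks = set(myruler)
--     k = 1
--     while k <= max(myruler):
--         if not any(m + k in marks for m in myruler):
--             return False
--         k += 1
--     return True
-- ===== Notes on version B (the rewrite author's own statement) =====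
-- stated objective: faster
-- what changed: B replaces the materialised list of all pairwise differences with per-distance probes against a hash set of marks (for each k, test whether some mark m has m+k in the set), removing the O(n^2) pair list and the O(n^2) count scan per distance.
import Mathlib
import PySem

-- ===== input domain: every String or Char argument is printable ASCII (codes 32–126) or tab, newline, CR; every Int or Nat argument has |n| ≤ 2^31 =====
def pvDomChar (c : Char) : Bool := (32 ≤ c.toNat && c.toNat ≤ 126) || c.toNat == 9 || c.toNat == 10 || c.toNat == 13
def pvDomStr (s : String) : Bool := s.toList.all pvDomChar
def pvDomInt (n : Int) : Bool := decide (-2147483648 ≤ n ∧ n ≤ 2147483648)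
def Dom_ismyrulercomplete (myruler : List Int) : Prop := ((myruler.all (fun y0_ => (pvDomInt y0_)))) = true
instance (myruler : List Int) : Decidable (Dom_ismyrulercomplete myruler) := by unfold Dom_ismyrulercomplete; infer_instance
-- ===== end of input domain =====

-- B replaces the all-pairs difference list with per-distance probes against a set of marks (asymptotically faster).

-- ===== PORT A =====
-- combinations(myruler, 2) as ordered pairs (i < j by position)
def pvCombos2 : List Int → List (Int × Int)
  | [] => []
  | x :: xs => xs.map (fun y => (x, y)) ++ pvCombos2 xs

-- the while loop of A ('while k <= max: …; k += 1'); fuel = number of remaining iterations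
def pvLoopA (diffs : List Int) (mx : Int) : Int → Nat → Bool
  | _, 0 => true
  | k, fuel + 1 =>
      if k ≤ mx then
        (if PySem.List.count diffs k = 0 then false else pvLoopA diffs mx (k + 1) fuel)
      else true

def ismyrulercomplete (myruler : List Int) : Bool :=
  let diffs := (pvCombos2 myruler).map (fun p => |p.1 - p.2|)
  match PySem.List.max? myruler (fun x => x) with
  | none => false   -- max([]) raises ValueError: outside Pre_
  | some m => pvLoopA diffs m 1 m.toNat

-- ===== PORT B =====
-- B's while loop; fuel = number of remaining iterations
def pvLoopB (myruler : List Int) (marks : PySem.Set Int) (mx : Int) : Int → Nat → Bool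
  | _, 0 => true
  | k, fuel + 1 =>
      if k ≤ mx then
        (if myruler.any (fun m => PySem.Set.contains marks (m + k)) then
          pvLoopB myruler marks mx (k + 1) fuel
        else false)
      else true

def ismyrulercomplete_alt (myruler : List Int) : Bool :=
  let marks : PySem.Set Int := PySem.Set.ofList myruler
  match PySem.List.max? myruler (fun x => x) with
  | none => false   -- max([]) raises ValueError: outside Pre_
  | some m => pvLoopB myruler marks m 1 m.toNat

-- ===== PRECONDITION & SPEC =====
-- Pre_ excludes only the empty list, on which the Python A raises ValueError (max of empty sequence).
def Pre_ismyrulercomplete (myruler : List Int) : Prop := myruler ≠ []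
instance (myruler : List Int) : Decidable (Pre_ismyrulercomplete myruler) := by unfold Pre_ismyrulercomplete; infer_instance
def pvWitness_ismyrulercomplete : List Int := [0, 1, 3]

def Spec_ismyrulercomplete (myruler : List Int) (out : Bool) : Prop := out = ismyrulercomplete_alt myruler
instance (myruler : List Int) (out : Bool) : Decidable (Spec_ismyrulercomplete myruler out) := by unfold Spec_ismyrulercomplete; infer_instance

-- ===== CLAIM (what is proved, stated in full; the proofs are below) =====
def Claim_equal_ismyrulercomplete : Prop := ∀ (myruler : List Int), Dom_ismyrulercomplete myruler → Pre_ismyrulercomplete myruler → Spec_ismyrulercomplete myruler (ismyrulercomplete myruler)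

-- ===== LEMMAS AND PROOFS =====

theorem mem_pvCombos2 {l : List Int} {p : Int × Int} (h : p ∈ pvCombos2 l) :
    p.1 ∈ l ∧ p.2 ∈ l := by
  induction l with
  | nil => simp [pvCombos2] at h
  | cons x xs ih =>
      simp only [pvCombos2, List.mem_append, List.mem_map] at h
      rcases h with ⟨y, hy, rfl⟩ | h
      · simp [hy]
      · rcases ih h with ⟨h1, h2⟩
        simp [h1, h2]

theorem pvCombos2_of_mem {l : List Int} {a b : Int} (ha : a ∈ l) (hb : b ∈ l) (hne : a ≠ b) :
    (a, b) ∈ pvCombos2 l ∨ (b, a) ∈ pvCombos2 l := by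
  induction l with
  | nil => simp at ha
  | cons x xs ih =>
      rcases List.mem_cons.mp ha with rfl | ha'
      · rcases List.mem_cons.mp hb with rfl | hb'
        · exact absurd rfl hne
        · left; simp [pvCombos2, List.mem_map]; exact Or.inl hb'
      · rcases List.mem_cons.mp hb with rfl | hb'
        · right; simp [pvCombos2, List.mem_map]; exact Or.inl ha'
        · rcases ih ha' hb' with h | h
          · left; simp [pvCombos2]; exact Or.inr h
          · right; simp [pvCombos2]; exact Or.inr h

-- for k ≥ 1: k occurs among the pairwise differences iff some mark m has m + k a mark
theorem count_diffs_iff {l : List Int} {k : Int} (hk : 1 ≤ k) :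
    (PySem.List.count ((pvCombos2 l).map (fun p => |p.1 - p.2|)) k = 0) ↔
      ¬ ∃ m ∈ l, m + k ∈ l := by
  rw [PySem.List.count_eq]
  constructor
  · intro h ⟨m, hm, hmk⟩
    have hne : (m + k) ≠ m := by omega
    have habs : |m + k - m| = k := by
      have : m + k - m = k := by ring
      rw [this]; exact abs_of_pos (by omega)
    rcases pvCombos2_of_mem hmk hm hne with hc | hc
    · have : k ∈ (pvCombos2 l).map (fun p => |p.1 - p.2|) := by
        exact List.mem_map.mpr ⟨(m + k, m), hc, habs⟩
      have := List.count_pos_iff.mpr this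
      omega
    · have habs' : |m - (m + k)| = k := by
        rw [abs_sub_comm]; exact habs
      have : k ∈ (pvCombos2 l).map (fun p => |p.1 - p.2|) := by
        exact List.mem_map.mpr ⟨(m, m + k), hc, habs'⟩
      have := List.count_pos_iff.mpr this
      omega
  · intro h
    by_contra hc
    have hpos : 0 < List.count k ((pvCombos2 l).map (fun p => |p.1 - p.2|)) := by
      omega
    have hmem := List.count_pos_iff.mp hpos
    rcases List.mem_map.mp hmem with ⟨⟨a, b⟩, hp, habs⟩
    rcases mem_pvCombos2 hp with ⟨ha, hb⟩
    simp only at habs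
    apply h
    rcases abs_cases (a - b) with ⟨he, _⟩ | ⟨he, _⟩
    · exact ⟨b, hb, by rw [show b + k = a by omega]; exact ha⟩
    · exact ⟨a, ha, by rw [show a + k = b by omega]; exact hb⟩

theorem loop_eq (l : List Int) (mx : Int) (fuel : Nat) (k : Int) (hk : 1 ≤ k) :
    pvLoopA ((pvCombos2 l).map (fun p => |p.1 - p.2|)) mx k fuel =
      pvLoopB l (PySem.Set.ofList l) mx k fuel := by
  induction fuel generalizing k with
  | zero => rfl
  | succ fuel ih =>
      have hcond : (l.any (fun m => PySem.Set.contains (PySem.Set.ofList l) (m + k)) = true) ↔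
          ¬ (PySem.List.count ((pvCombos2 l).map (fun p => |p.1 - p.2|)) k = 0) := by
        rw [count_diffs_iff hk]
        simp only [List.any_eq_true, PySem.Set.contains_iff, PySem.Set.mem_ofList, not_not]
      simp only [pvLoopA, pvLoopB]
      by_cases hle : k ≤ mx
      · rw [if_pos hle, if_pos hle]
        by_cases h : PySem.List.count ((pvCombos2 l).map (fun p => |p.1 - p.2|)) k = 0
        · have hfalse : l.any (fun m => PySem.Set.contains (PySem.Set.ofList l) (m + k)) = false := by
            rw [Bool.eq_false_iff]
            intro ht
            exact (hcond.mp ht) h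
          rw [if_pos h, hfalse]; simp
        · rw [if_neg h, hcond.mpr h]
          simp only [if_pos]
          exact ih (k + 1) (by omega)
      · rw [if_neg hle, if_neg hle]

-- ===== VERDICT (by name: the statement is the Claim_ definition above) =====
theorem ismyrulercomplete_spec : Claim_equal_ismyrulercomplete := by
  intro l _ _
  unfold Spec_ismyrulercomplete ismyrulercomplete ismyrulercomplete_alt
  cases hmax : PySem.List.max? l (fun x => x) with
  | none => simp
  | some m =>
      simp only
      exact loop_eq l m m.toNat 1 (by omega)
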